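-- pv_equiv track=rewrite | github.com/dv-jackson/algorithm_practice | largest_number_under_constraint/largest_number_under_constraint.py | get_number_constraint
-- ===== SOURCE A (Python) =====
-- def get_number_constraint(n: int, c: int) -> str:
--     number: str = str(n)
--
--     max_number: list[int] = []
--
--     constraint_fount: bool = False
--
--     for digit_str in number:
--         digit:int = int(digit_str)
--
--         if c == 9:
--             if constraint_fount:
--                 digit = 8
--
--             else:
--                 if digit == c:
--                     constraint_fount = True
--                     digit -= 1
--
--         elif digit == 0:
--             # If constraint = 0 then go up and subtract 1 from previous digit
--             digit = 9
--
--             holder_digit: int = max_number.pop()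
--             holder_digit -= 1
--             max_number.append(holder_digit)
--
--         else:
--             digit -= 1
--
--         max_number.append(digit)
--
--     return ''.join(map(str, max_number))
-- ===== SOURCE B (Python) =====
-- def get_number_constraint(n: int, c: int) -> str:
--     digits = [int(ch) for ch in str(n)]  # preserves ValueError on the '-' of a negative n
--     if c == 9:
--         # regime split: unchanged prefix before the first 9, then 8s to the end
--         i = digits.index(9) if 9 in digits else len(digits)
--         out = digits[:i] + [8] * (len(digits) - i)
--     else:
--         # one-step lookahead instead of a stack with back-correction
--         out = [(9 if d == 0 else d - 1) - (1 if nd == 0 else 0)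
--                for d, nd in zip(digits, digits[1:] + [1])]
--     return ''.join(map(str, out))
-- ===== Notes on version B (the rewrite author's own statement) =====
-- stated objective: alternative
-- what changed: Replaces A's stack with pop/back-correction and mutable 9-found flag by a stateless formulation: for c==9 a regime split at the first 9 (prefix unchanged, 8s after), otherwise a one-step-lookahead zip of each digit with its successor.
import Mathlib
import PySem

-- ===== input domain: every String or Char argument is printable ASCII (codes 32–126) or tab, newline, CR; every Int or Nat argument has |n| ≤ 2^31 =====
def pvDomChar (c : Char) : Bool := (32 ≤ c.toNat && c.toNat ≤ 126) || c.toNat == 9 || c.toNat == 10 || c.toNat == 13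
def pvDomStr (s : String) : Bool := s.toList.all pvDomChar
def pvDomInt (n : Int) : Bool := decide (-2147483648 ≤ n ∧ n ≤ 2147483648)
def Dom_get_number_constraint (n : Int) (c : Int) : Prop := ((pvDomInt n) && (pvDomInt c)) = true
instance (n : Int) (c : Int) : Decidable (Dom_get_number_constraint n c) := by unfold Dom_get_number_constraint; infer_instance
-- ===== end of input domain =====

-- B replaces A's stack with pop/back-correction and found-flag by a stateless regime split
-- (c == 9) / one-step-lookahead zip (c != 9); objective: alternative decomposition, same cost.
-- Pre_ excludes exactly the inputs where the Python A raises (n < 0: ValueError; n = 0, c ≠ 9: IndexError).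


-- ===== PORT A =====
-- int(ch) for a single character (used by both Pythons on every character of str(n));
-- the .getD 0 is never reached inside Pre_ (every character of str(n) for n ≥ 0 is a digit).
def gncDigit (ch : Char) : Int := (PySem.Int.ofChars? [ch]).getD 0

-- one loop iteration of A; the accumulator list is kept REVERSED (head = top of the Python
-- list-as-stack), so append = cons and pop = head; state = (max_number reversed, constraint_fount)
def gncStepA (c : Int) (st : List Int × Bool) (ch : Char) : List Int × Bool :=
  let digit := gncDigit ch
  if c = 9 then
    if st.2 then (8 :: st.1, st.2)
    else if digit = c then ((digit - 1) :: st.1, true)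
    else (digit :: st.1, st.2)
  else if digit = 0 then
    match st.1 with
    | h :: t => (9 :: (h - 1) :: t, st.2)   -- pop, subtract 1, re-append, then append 9
    | [] => ([9], st.2)                     -- Python: IndexError (pop from []); outside Pre_
  else ((digit - 1) :: st.1, st.2)

def get_number_constraint (n : Int) (c : Int) : String :=
  let st := (PySem.Int.toChars n).foldl (gncStepA c) ([], false)
  PySem.Str.join "" (st.1.reverse.map PySem.Int.toStr)

-- ===== PORT B =====
-- digits.index(9) if 9 in digits else len(digits)
def gncIdx9 (ds : List Int) : Nat :=
  match PySem.List.index? ds 9 with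
  | some j => j
  | none => ds.length

-- out digit for (d, nd) = (digit, its successor; 1 as sentinel after the last digit)
def gncLook (p : Int × Int) : Int :=
  (if p.1 = 0 then 9 else p.1 - 1) - (if p.2 = 0 then 1 else 0)

def get_number_constraint_alt (n : Int) (c : Int) : String :=
  let digits := (PySem.Int.toChars n).map gncDigit
  let out :=
    if c = 9 then
      let i : Nat := gncIdx9 digits
      PySem.List.slice digits none (some (i : Int)) ++ List.replicate (digits.length - i) 8
    else
      (digits.zip (digits.tail ++ [1])).map gncLook
  PySem.Str.join "" (out.map PySem.Int.toStr)

-- ===== PRECONDITION & SPEC =====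
-- Pre_ = exactly where the Python A returns: n ≥ 0 (else int('-') raises ValueError) and,
-- unless c = 9, n ≠ 0 (on n = 0 with c ≠ 9 A pops from an empty list: IndexError).
def Pre_get_number_constraint (n : Int) (c : Int) : Prop := 0 ≤ n ∧ (n ≠ 0 ∨ c = 9)
instance (n : Int) (c : Int) : Decidable (Pre_get_number_constraint n c) := by
  unfold Pre_get_number_constraint; infer_instance
def pvWitness_get_number_constraint : Int × Int := (902, 0)

def Spec_get_number_constraint (n : Int) (c : Int) (out : String) : Prop := out = get_number_constraint_alt n c
instance (n : Int) (c : Int) (out : String) : Decidable (Spec_get_number_constraint n c out) := by unfold Spec_get_number_constraint; infer_instance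

-- ===== CLAIM (what is proved, stated in full; the proofs are below) =====
def Claim_equal_get_number_constraint : Prop := ∀ (n : Int) (c : Int), Dom_get_number_constraint n c → Pre_get_number_constraint n c → Spec_get_number_constraint n c (get_number_constraint n c)

-- ===== LEMMAS AND PROOFS =====

-- base value of a digit under the c ≠ 9 rule, before the lookahead correction
def gncBase (d : Int) : Int := if d = 0 then 9 else d - 1

-- A's stack contents (in order) after processing digits ds with pending top value x (c ≠ 9)
def gncARes (x : Int) : List Int → List Int
  | [] => [x]
  | d :: ds => (x - (if d = 0 then 1 else 0)) :: gncARes (gncBase d) ds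

theorem gncStepA_ne9 (c : Int) (hc : c ≠ 9) (acc : List Int) (b : Bool) (ch : Char) :
    gncStepA c (acc, b) ch =
      ((gncBase (gncDigit ch)) ::
        (if gncDigit ch = 0 then (match acc with | h :: t => (h - 1) :: t | [] => []) else acc), b) := by
  simp only [gncStepA, gncBase, if_neg hc]
  by_cases h : gncDigit ch = 0
  · cases acc <;> simp [h]
  · simp [h]

theorem gncFoldA_ne9 (c : Int) (hc : c ≠ 9) (cs : List Char) :
    ∀ (x : Int) (t : List Int) (b : Bool),
      cs.foldl (gncStepA c) (x :: t, b) = ((gncARes x (cs.map gncDigit)).reverse ++ t, b) := by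
  induction cs with
  | nil => intro x t b; simp [gncARes]
  | cons ch cs ih =>
    intro x t b
    rw [List.foldl_cons, gncStepA_ne9 c hc]
    by_cases h : gncDigit ch = 0 <;>
      simp [h, ih, gncARes, gncBase, List.append_assoc]

theorem gncZip_eq_ARes (d : Int) (ds : List Int) :
    ((d :: ds).zip (ds ++ [1])).map gncLook = gncARes (gncBase d) ds := by
  induction ds generalizing d with
  | nil => simp [gncLook, gncARes, gncBase]
  | cons d' ds ih => simp [gncLook, gncARes, gncBase, ih]

-- A's fold in the c = 9 regime once the flag is set: every remaining digit becomes 8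
theorem gncFoldA_found (cs : List Char) :
    ∀ (acc : List Int),
      cs.foldl (gncStepA 9) (acc, true) = ((List.replicate cs.length 8).reverse ++ acc, true) := by
  induction cs with
  | nil => simp
  | cons ch cs ih =>
    intro acc
    simp [gncStepA, ih, List.replicate_succ, List.append_assoc]

-- A's fold in the c = 9 regime with the flag unset: digits pass through until the first 9
def gncNine (ds : List Int) : List Int :=
  ds.take (gncIdx9 ds) ++ List.replicate (ds.length - gncIdx9 ds) 8

theorem gncIdx9_cons_self (ds : List Int) : gncIdx9 (9 :: ds) = 0 := by
  unfold gncIdx9; rw [PySem.List.index?_cons_self]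

theorem gncIdx9_cons_of_ne {d : Int} (h : d ≠ 9) (ds : List Int) :
    gncIdx9 (d :: ds) = gncIdx9 ds + 1 := by
  unfold gncIdx9
  rw [PySem.List.index?_cons_of_ne _ h]
  cases PySem.List.index? ds 9 <;> simp

theorem gncFoldA_nine (cs : List Char) :
    ∀ (acc : List Int),
      cs.foldl (gncStepA 9) (acc, false) =
        ((gncNine (cs.map gncDigit)).reverse ++ acc,
         (PySem.List.index? (cs.map gncDigit) 9).isSome) := by
  induction cs with
  | nil => intro acc; simp [gncNine, gncIdx9, PySem.List.index?]
  | cons ch cs ih =>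
    intro acc
    by_cases h : gncDigit ch = 9
    · have hstep : gncStepA 9 (acc, false) ch = (8 :: acc, true) := by
        simp [gncStepA, h]
      rw [List.foldl_cons, hstep, gncFoldA_found]
      rw [show (ch :: cs).map gncDigit = 9 :: cs.map gncDigit by simp [h]]
      rw [PySem.List.index?_cons_self]
      simp [gncNine, gncIdx9_cons_self, List.replicate_succ, List.append_assoc]
    · have hstep : gncStepA 9 (acc, false) ch = (gncDigit ch :: acc, false) := by
        simp [gncStepA, h]
      rw [List.foldl_cons, hstep, ih]
      rw [show (ch :: cs).map gncDigit = gncDigit ch :: cs.map gncDigit by simp]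
      rw [PySem.List.index?_cons_of_ne _ h]
      simp only [Prod.mk.injEq]
      constructor
      · rw [gncNine, gncNine, gncIdx9_cons_of_ne h]
        simp [List.append_assoc]
      · cases PySem.List.index? (cs.map gncDigit) 9 <;> simp

-- ===== VERDICT (by name: the statement is the Claim_ definition above) =====
theorem get_number_constraint_spec : Claim_equal_get_number_constraint := by
  intro n c _ _
  show get_number_constraint n c = get_number_constraint_alt n c
  unfold get_number_constraint get_number_constraint_alt
  by_cases hc : c = 9
  · subst hc
    rw [gncFoldA_nine _ ([] : List Int)]
    simp [gncNine, PySem.List.slice_to_natCast]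
  · simp only [if_neg hc]
    cases hcs : PySem.Int.toChars n with
    | nil => simp
    | cons ch cs =>
      have hstep : gncStepA c (([] : List Int), false) ch = ([gncBase (gncDigit ch)], false) := by
        rw [gncStepA_ne9 c hc]
        by_cases h : gncDigit ch = 0 <;> simp [h]
      rw [List.foldl_cons, hstep, gncFoldA_ne9 c hc]
      simp [gncZip_eq_ARes]
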